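-- pv_equiv track=rewrite | github.com/donghyeon95/- | 9주차/심동민_풀이/함정발동(하).py | solution
-- ===== SOURCE A (Python) =====
-- def solution(idx, array):
--     man = 0
--
--     if idx % 2:
--         for i, elem in enumerate(array):
--             if i % 2 and elem == 'H':
--                 man += 1
--     else:
--         for i, elem in enumerate(array):
--             if not (i % 2) and elem == 'H':
--                 man += 1
--
--     return man
-- ===== SOURCE B (Python) =====
-- def solution(idx, array):
--     return array[idx % 2::2].count('H')
-- ===== Notes on version B (the rewrite author's own statement) =====
-- stated objective: simpler
-- what changed: Replaces the two mirror index-parity loops with a single expression: a strided slice array[idx % 2::2] selects exactly the matching-parity positions and the built-in count tallies the 'H's.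
import Mathlib
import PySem

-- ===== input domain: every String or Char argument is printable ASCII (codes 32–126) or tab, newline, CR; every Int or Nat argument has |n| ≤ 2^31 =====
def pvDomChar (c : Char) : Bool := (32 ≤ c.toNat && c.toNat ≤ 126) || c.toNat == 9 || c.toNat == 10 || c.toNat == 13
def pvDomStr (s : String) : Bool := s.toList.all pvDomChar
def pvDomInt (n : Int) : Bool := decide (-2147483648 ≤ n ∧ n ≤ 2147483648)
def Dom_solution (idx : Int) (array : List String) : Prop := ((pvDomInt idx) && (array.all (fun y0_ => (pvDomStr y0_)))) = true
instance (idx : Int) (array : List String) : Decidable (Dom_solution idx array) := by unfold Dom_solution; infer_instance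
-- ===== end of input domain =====

-- B replaces A's two mirror index-parity loops by a strided slice array[idx % 2::2] plus the built-in count (simpler, single expression).

-- ===== PORT A =====
def solution (idx : Int) (array : List String) : Int :=
  let man : Int := 0
  if PySem.Int.mod idx 2 ≠ 0 then
    (PySem.List.enumerate array).foldl
      (fun man p => if PySem.Int.mod p.1 2 ≠ 0 ∧ p.2 = "H" then man + 1 else man) man
  else
    (PySem.List.enumerate array).foldl
      (fun man p => if ¬ PySem.Int.mod p.1 2 ≠ 0 ∧ p.2 = "H" then man + 1 else man) man

-- ===== PORT B =====
def solution_alt (idx : Int) (array : List String) : Int :=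
  (((PySem.List.slice? array (some (PySem.Int.mod idx 2)) none 2).getD []).count "H" : Int)

-- ===== PRECONDITION & SPEC =====
def Spec_solution (idx : Int) (array : List String) (out : Int) : Prop := out = solution_alt idx array
instance (idx : Int) (array : List String) (out : Int) : Decidable (Spec_solution idx array out) := by unfold Spec_solution; infer_instance

-- ===== CLAIM (what is proved, stated in full; the proofs are below) =====
def Claim_equal_solution : Prop := ∀ (idx : Int) (array : List String), Dom_solution idx array → Spec_solution idx array (solution idx array)

-- ===== LEMMAS AND PROOFS =====

-- elements at even (b = true) resp. odd (b = false) positions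
def pvEo {α : Type} (b : Bool) : List α → List α
  | [] => []
  | x :: r => if b then x :: pvEo false r else pvEo true r

lemma pv_slice1_cons {α : Type} (x : α) (r : List α) :
    PySem.List.slice? (x::r) (some 1) none 2 = PySem.List.slice? r (some 0) none 2 := by
  simp only [PySem.List.slice?, PySem.List.sliceIndices]
  norm_num
  apply List.filterMap_congr
  intro k _
  have h1 : (1 + 2 * (k:Int)).toNat = 2*k+1 := by omega
  have h2 : (2 * (k:Int)).toNat = 2*k := by omega
  rw [h1, h2, List.getElem?_cons_succ]

lemma pv_slice0_cons {α : Type} (x : α) (r : List α) :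
    PySem.List.slice? (x::r) (some 0) none 2 = (PySem.List.slice? r (some 1) none 2).map (x :: ·) := by
  cases r with
  | nil =>
    simp [PySem.List.slice?, PySem.List.sliceIndices]
  | cons y t =>
    simp only [PySem.List.slice?, PySem.List.sliceIndices]
    norm_num
    have hL : (if (0:Int) ≤ (t.length:Int) + 1 then (((t.length:Int) + 1 + 1 - min 0 ((t.length:Int)+1+1) + 2 - 1)/2).toNat else 0)
        = (if 0 < t.length then (((t.length:Int) + 2 - 1)/2).toNat else 0) + 1 := by
      split_ifs <;> omega
    rw [hL, List.range_succ_eq_map, List.filterMap_cons]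
    norm_num
    have h0 : (min (0:Int) ((t.length:Int)+1+1)).toNat = 0 := by omega
    rw [h0]
    simp only [List.getElem?_cons_zero]
    refine congrArg (x :: ·) ?_
    apply List.filterMap_congr
    intro k _
    have h1 : (min (0:Int) ((t.length:Int)+1+1) + 2 * ((k:Int)+1)).toNat = 2*k+2 := by omega
    have h2 : ((1:Int) + 2 * (k:Int)).toNat = 2*k+1 := by omega
    rw [h1, h2]
    rfl

lemma pv_slice_eo {α : Type} (xs : List α) :
    PySem.List.slice? xs (some 0) none 2 = some (pvEo true xs) ∧
    PySem.List.slice? xs (some 1) none 2 = some (pvEo false xs) := by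
  induction xs with
  | nil => exact ⟨rfl, rfl⟩
  | cons x r ih =>
    refine ⟨?_, ?_⟩
    · rw [pv_slice0_cons, ih.2]; simp [pvEo]
    · rw [pv_slice1_cons, ih.1]; simp [pvEo]

lemma pv_fold_odd : ∀ (xs : List String) (s c : Int) (b : Bool),
    PySem.Int.mod s 2 = (if b then 1 else 0) →
    (PySem.List.enumerate xs s).foldl
      (fun man p => if PySem.Int.mod p.1 2 ≠ 0 ∧ p.2 = "H" then man + 1 else man) c
      = c + ((pvEo b xs).count "H" : Int) := by
  intro xs
  induction xs with
  | nil => intro s c b _; simp [PySem.List.enumerate]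
  | cons x r ih =>
    intro s c b hb
    have hs1 : PySem.Int.mod (s+1) 2 = (if !b then 1 else 0) := by
      rw [PySem.Int.mod_eq_emod_of_pos (a := s+1) (by omega)]
      rw [PySem.Int.mod_eq_emod_of_pos (a := s) (by omega)] at hb
      cases b <;> simp_all <;> omega
    rw [PySem.List.enumerate_cons, List.foldl_cons, ih (s+1) _ (!b) hs1]
    cases b with
    | true =>
      have hP : PySem.Int.mod s 2 ≠ 0 := by rw [hb]; decide
      by_cases hx : x = "H"
      · rw [if_pos ⟨hP, hx⟩]; simp [pvEo, hx]; omega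
      · rw [if_neg (by simp [hx])]; simp [pvEo, hx]
    | false =>
      have hb0 : PySem.Int.mod s 2 = 0 := by simpa using hb
      have hP : ¬ (PySem.Int.mod s 2 ≠ 0 ∧ x = "H") := by
        rintro ⟨h1, _⟩; exact h1 hb0
      rw [if_neg hP]; simp [pvEo]

lemma pv_fold_even : ∀ (xs : List String) (s c : Int) (b : Bool),
    PySem.Int.mod s 2 = (if b then 0 else 1) →
    (PySem.List.enumerate xs s).foldl
      (fun man p => if ¬ PySem.Int.mod p.1 2 ≠ 0 ∧ p.2 = "H" then man + 1 else man) c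
      = c + ((pvEo b xs).count "H" : Int) := by
  intro xs
  induction xs with
  | nil => intro s c b _; simp [PySem.List.enumerate]
  | cons x r ih =>
    intro s c b hb
    have hs1 : PySem.Int.mod (s+1) 2 = (if !b then 0 else 1) := by
      rw [PySem.Int.mod_eq_emod_of_pos (a := s+1) (by omega)]
      rw [PySem.Int.mod_eq_emod_of_pos (a := s) (by omega)] at hb
      cases b <;> simp_all <;> omega
    rw [PySem.List.enumerate_cons, List.foldl_cons, ih (s+1) _ (!b) hs1]
    cases b with
    | true =>
      have hb0 : PySem.Int.mod s 2 = 0 := by simpa using hb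
      have hP : ¬ PySem.Int.mod s 2 ≠ 0 := not_not_intro hb0
      by_cases hx : x = "H"
      · rw [if_pos ⟨hP, hx⟩]; simp [pvEo, hx]; omega
      · rw [if_neg (by simp [hx])]; simp [pvEo, hx]
    | false =>
      have hb1 : PySem.Int.mod s 2 = 1 := by simpa using hb
      have hP : ¬ (¬ PySem.Int.mod s 2 ≠ 0 ∧ x = "H") := by
        rintro ⟨h1, _⟩; rw [not_not] at h1; exact absurd (h1.symm.trans hb1) (by decide)
      rw [if_neg hP]; simp [pvEo]

-- ===== VERDICT (by name: the statement is the Claim_ definition above) =====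
theorem solution_spec : Claim_equal_solution := by
  intro idx array _
  unfold Spec_solution solution solution_alt
  have hmod : PySem.Int.mod idx 2 = 0 ∨ PySem.Int.mod idx 2 = 1 := by
    rw [PySem.Int.mod_eq_emod_of_pos (a := idx) (by omega)]; omega
  have h00 : PySem.Int.mod (0:Int) 2 = 0 := by decide
  rcases hmod with h | h
  · rw [h, if_neg (by simp)]
    rw [pv_fold_even array 0 0 true (by rw [h00]; rfl), (pv_slice_eo array).1]
    simp
  · rw [h, if_pos (by simp)]
    rw [pv_fold_odd array 0 0 false (by rw [h00]; rfl), (pv_slice_eo array).2]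
    simp
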